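-- pv_equiv track=rewrite | github.com/datlt2000/vehicle-routing-problem | vrp-GA.py | decode_vrp
-- ===== SOURCE A (Python) =====
-- def decode_vrp(chromosome):
--     ls = []
--     truck = [0]
--     for k in chromosome:
--         truck.append(k)
--         if k == 0:
--             ls.append(truck)
--             truck = [0]
--     truck.append(0)
--     ls.append(truck)
--     return ls
-- ===== SOURCE B (Python) =====
-- def decode_vrp(chromosome):
--     # Recursive: cut off the route ending at the first depot (0) by slicing, recurse on the rest.
--     if 0 in chromosome:
--         i = chromosome.index(0)
--         return [[0] + chromosome[:i + 1]] + decode_vrp(chromosome[i + 1:])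
--     return [[0] + chromosome + [0]]
-- ===== Notes on version B (the rewrite author's own statement) =====
-- stated objective: alternative
-- what changed: Replaces A's single accumulating loop (building each route element by element and flushing on 0) with a recursive formulation: locate the first depot with .index, cut that route out by slicing, and recurse on the remaining tail.
import Mathlib
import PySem

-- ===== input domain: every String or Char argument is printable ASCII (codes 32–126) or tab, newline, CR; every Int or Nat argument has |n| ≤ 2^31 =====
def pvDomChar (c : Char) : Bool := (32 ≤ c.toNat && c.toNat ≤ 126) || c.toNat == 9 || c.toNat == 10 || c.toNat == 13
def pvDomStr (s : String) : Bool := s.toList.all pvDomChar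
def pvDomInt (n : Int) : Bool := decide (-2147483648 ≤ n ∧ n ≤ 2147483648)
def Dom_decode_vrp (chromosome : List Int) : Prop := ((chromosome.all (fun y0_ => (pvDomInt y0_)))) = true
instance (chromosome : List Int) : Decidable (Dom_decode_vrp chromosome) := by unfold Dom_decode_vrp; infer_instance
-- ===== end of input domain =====

-- B replaces A's accumulating loop by recursion: find the first depot with .index,
-- slice off that route, and recurse on the remainder (alternative decomposition, same cost).


-- ===== PORT A =====
-- A: one loop carrying (ls, truck); truck starts [0], each k is appended, and on k == 0
-- the truck is flushed to ls and restarted at [0]; finally truck gets a 0 and is flushed.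
def decode_vrp (chromosome : List Int) : List (List Int) :=
  let st := chromosome.foldl
    (fun (st : List (List Int) × List Int) k =>
      let truck := st.2 ++ [k]
      if k == 0 then (st.1 ++ [truck], [0]) else (st.1, truck))
    ([], [0])
  st.1 ++ [st.2 ++ [0]]

-- ===== PORT B =====
-- B: if 0 occurs, i = chromosome.index(0); emit [0] + chromosome[:i+1] and recurse on
-- chromosome[i+1:]; otherwise the single route [0] + chromosome + [0].
def decode_vrp_alt (chromosome : List Int) : List (List Int) :=
  if h : (0 : Int) ∈ chromosome then
    let i : Nat := (PySem.List.index? chromosome 0).get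
      (by rw [PySem.List.index?_isSome_iff]; exact h)
    [[0] ++ PySem.List.slice chromosome none (some ((i : Int) + 1))] ++
      decode_vrp_alt (PySem.List.slice chromosome (some ((i : Int) + 1)) none)
  else [[0] ++ chromosome ++ [0]]
termination_by chromosome.length
decreasing_by
  have hlen : ((i : Int) + 1) = (((i + 1 : Nat)) : Int) := by push_cast; ring
  rw [hlen, PySem.List.slice_from_natCast]
  have : 0 < chromosome.length := List.length_pos_of_mem h
  simp [List.length_drop]
  omega

-- ===== PRECONDITION & SPEC =====
def Spec_decode_vrp (chromosome : List Int) (out : List (List Int)) : Prop := out = decode_vrp_alt chromosome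
instance (chromosome : List Int) (out : List (List Int)) : Decidable (Spec_decode_vrp chromosome out) := by unfold Spec_decode_vrp; infer_instance

-- ===== CLAIM =====
def Claim_equal_decode_vrp : Prop := ∀ (chromosome : List Int), Dom_decode_vrp chromosome → Spec_decode_vrp chromosome (decode_vrp chromosome)

-- ===== LEMMAS AND PROOFS =====

-- Proof-side helper: the zero-delimited segments of a list (accumulator cur).
def pvSegs : List Int → List Int → List (List Int)
  | [], current => [current]
  | k :: rest, current =>
      if k == 0 then current :: pvSegs rest [] else pvSegs rest (current ++ [k])

-- Loop invariant for A: the fold from state (ls, 0 :: cur) finishes to ls followed by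
-- the wrapped segments computed from accumulator cur.
theorem decode_vrp_key (c : List Int) : ∀ (ls : List (List Int)) (cur : List Int),
    (fun st : List (List Int) × List Int => st.1 ++ [st.2 ++ [0]])
      (c.foldl (fun (st : List (List Int) × List Int) k =>
          let truck := st.2 ++ [k]
          if k == 0 then (st.1 ++ [truck], [0]) else (st.1, truck)) (ls, 0 :: cur))
    = ls ++ (pvSegs c cur).map (fun seg => ([0] ++ seg) ++ [0]) := by
  induction c with
  | nil => intro ls cur; simp [pvSegs]
  | cons k rest ih =>
    intro ls cur
    by_cases hk : k = 0
    · subst hk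
      have h := ih (ls ++ [(0 :: cur) ++ [0]]) []
      simp [pvSegs, List.foldl_cons, List.append_assoc] at h ⊢
      exact h
    · have : (0 :: cur) ++ [k] = 0 :: (cur ++ [k]) := by simp
      simpa [pvSegs, hk, List.foldl_cons, this] using ih ls (cur ++ [k])

-- A equals the wrapped segments.
theorem decode_vrp_eq_segs (c : List Int) :
    decode_vrp c = (pvSegs c []).map (fun seg => ([0] ++ seg) ++ [0]) := by
  unfold decode_vrp
  simpa using decode_vrp_key c [] []

-- Segments of a zero-free list: the single segment cur ++ c.
theorem pvSegs_no_zero (c : List Int) (hc : (0 : Int) ∉ c) :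
    ∀ cur, pvSegs c cur = [cur ++ c] := by
  induction c with
  | nil => intro cur; simp [pvSegs]
  | cons k rest ih =>
    intro cur
    have hk : k ≠ 0 := fun h => hc (by simp [h])
    have hr : (0 : Int) ∉ rest := fun h => hc (List.mem_cons_of_mem _ h)
    simp [pvSegs, hk, ih hr, List.append_assoc]

-- Splitting at the first zero: segments of pre ++ 0 :: suf with 0 ∉ pre.
theorem pvSegs_split (pre suf : List Int) (hpre : (0 : Int) ∉ pre) :
    ∀ cur, pvSegs (pre ++ 0 :: suf) cur = (cur ++ pre) :: pvSegs suf [] := by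
  induction pre with
  | nil => intro cur; simp [pvSegs]
  | cons p ps ih =>
    intro cur
    have hp : p ≠ 0 := fun h => hpre (by simp [h])
    have hps : (0 : Int) ∉ ps := fun h => hpre (List.mem_cons_of_mem _ h)
    simp [pvSegs, hp, ih hps, List.append_assoc]

-- Main bridge: the wrapped segments are exactly what B computes, by strong induction on length.
theorem segs_eq_alt (n : Nat) : ∀ (c : List Int), c.length ≤ n →
    (pvSegs c []).map (fun seg => ([0] ++ seg) ++ [0]) = decode_vrp_alt c := by
  induction n with
  | zero =>
    intro c hc
    have : c = [] := List.eq_nil_of_length_eq_zero (Nat.le_zero.mp hc)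
    subst this
    simp [pvSegs, decode_vrp_alt]
  | succ n ih =>
    intro c hc
    by_cases h : (0 : Int) ∈ c
    · obtain ⟨i, hi⟩ := Option.isSome_iff_exists.mp
        ((PySem.List.index?_isSome_iff c 0).mpr h)
      obtain ⟨pre, suf, hsplit, hlen, hpre⟩ := (PySem.List.index?_eq_some_iff c 0 i).mp hi
      rw [decode_vrp_alt]
      simp only [dif_pos h, hi, Option.get_some]
      have hcast : ((i : Int) + 1) = (((i + 1 : Nat)) : Int) := by push_cast; ring
      rw [hcast, PySem.List.slice_to_natCast, PySem.List.slice_from_natCast]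
      subst hsplit
      have htake : (pre ++ 0 :: suf).take (i + 1) = pre ++ [0] := by
        rw [← hlen]
        simp [List.take_append]
      have hdrop : (pre ++ 0 :: suf).drop (i + 1) = suf := by
        rw [← hlen]
        simp [List.drop_append]
      have hsuf : suf.length ≤ n := by
        have := hc
        simp [List.length_append] at this
        omega
      rw [htake, hdrop, pvSegs_split pre suf hpre, ← ih suf hsuf]
      simp
    · rw [decode_vrp_alt]
      simp [dif_neg h, pvSegs_no_zero c h]

-- ===== VERDICT =====
theorem decode_vrp_spec : Claim_equal_decode_vrp := by
  intro c _
  unfold Spec_decode_vrp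
  rw [decode_vrp_eq_segs, segs_eq_alt c.length c (le_refl _)]
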